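-- pv_equiv track=rewrite | github.com/aledquin/aledquin.github.io | projs/ddr-hbm-phy-automation-team/ddr-utils-in08/dev/main/bin/rel_gr_bound_update.py | find_each_and_replace_by
-- ===== SOURCE A (Python) =====
-- def find_each_and_replace_by(string, substring, separator='x'):
--     """
--     list(find_each_and_replace_by('8989', '89', 'x'))
--     # ['x89', '89x']
--     list(find_each_and_replace_by('9999', '99', 'x'))
--     # ['x99', '9x9', '99x']
--     list(find_each_and_replace_by('9999', '89', 'x'))
--     # []
--     """
--     index = 0
--     while True:
--         index = string.find(substring, index)
--         if index == -1:
--             return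
--         yield string[:index] + separator + string[index + len(substring):]
--         index += 1
-- ===== SOURCE B (Python) =====
-- def find_each_and_replace_by(string, substring, separator='x'):
--     # Right-to-left sweep collecting replacements, then emit them reversed.
--     n, m = len(string), len(substring)
--     results = []
--     for i in range(n - m, -1, -1):
--         if string[i:i+m] == substring:
--             results.append(string[:i] + separator + string[i+m:])
--     yield from reversed(results)
-- ===== Notes on version B (the rewrite author's own statement) =====
-- stated objective: alternative
-- what changed: Replaces the stateful resume-at-index str.find loop with a staged computation: a right-to-left countdown sweep that pushes each replacement onto a list, emitted in original order by a final reversal (different traversal direction and back-to-front accumulation instead of find-driven jumping).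
import Mathlib
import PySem

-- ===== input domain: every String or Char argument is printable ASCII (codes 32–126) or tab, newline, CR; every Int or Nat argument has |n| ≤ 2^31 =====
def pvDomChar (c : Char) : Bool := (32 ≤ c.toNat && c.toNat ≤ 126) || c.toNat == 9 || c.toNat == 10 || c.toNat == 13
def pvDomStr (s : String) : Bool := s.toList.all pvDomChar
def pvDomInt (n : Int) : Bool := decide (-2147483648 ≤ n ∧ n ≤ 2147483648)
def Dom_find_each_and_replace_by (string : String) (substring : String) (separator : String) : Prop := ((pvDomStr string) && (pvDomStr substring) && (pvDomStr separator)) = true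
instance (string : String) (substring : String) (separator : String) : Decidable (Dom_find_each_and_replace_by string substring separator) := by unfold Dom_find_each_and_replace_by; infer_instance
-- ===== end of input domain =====

-- B replaces A's resume-at-index str.find loop by a right-to-left countdown sweep that
-- accumulates the replacements and emits them reversed (alternative decomposition, same cost).

-- ===== PORT A =====
-- A's 'while True: index = string.find(substring, index); …; index += 1' loop.
-- fuel (length + 2) is an upper bound on the iteration count: the resume index strictly
-- increases and never exceeds len(string); the proof shows the fuel is never exhausted.
def findLoopA (s sub sep : List Char) : Nat → Int → List String
  | 0, _ => []
  | fuel + 1, index =>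
    let idx := PySem.Chars.findFrom s sub index none
    if idx = -1 then []
    else
      String.ofList (PySem.List.slice s none (some idx) ++ sep ++
          PySem.List.slice s (some (idx + (sub.length : Int))) none) ::
        findLoopA s sub sep fuel (idx + 1)

def find_each_and_replace_by (string : String) (substring : String) (separator : String) : List String :=
  findLoopA string.toList substring.toList separator.toList (string.toList.length + 2) 0

-- ===== PORT B =====
def find_each_and_replace_by_alt (string : String) (substring : String) (separator : String) : List String :=
  let s := string.toList
  let sub := substring.toList
  let sep := separator.toList
  let n : Int := s.length
  let m : Int := sub.length
  let results := (PySem.List.pyRange (n - m) (-1) (-1)).foldl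
    (fun acc i =>
      if PySem.List.slice s (some i) (some (i + m)) = sub then
        acc ++ [String.ofList (PySem.List.slice s none (some i) ++ sep ++
          PySem.List.slice s (some (i + m)) none)]
      else acc) []
  results.reverse

-- ===== PRECONDITION & SPEC =====
def Spec_find_each_and_replace_by (string : String) (substring : String) (separator : String) (out : List String) : Prop := out = find_each_and_replace_by_alt string substring separator
instance (string : String) (substring : String) (separator : String) (out : List String) : Decidable (Spec_find_each_and_replace_by string substring separator out) := by unfold Spec_find_each_and_replace_by; infer_instance

-- ===== CLAIM (what is proved, stated in full; the proofs are below) =====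
def Claim_equal_find_each_and_replace_by : Prop := ∀ (string : String) (substring : String) (separator : String), Dom_find_each_and_replace_by string substring separator → Spec_find_each_and_replace_by string substring separator (find_each_and_replace_by string substring separator)

-- ===== LEMMAS AND PROOFS =====

-- The positions where substring matches, ascending, and the replacement made at a position.
def pvMatches (s sub : List Char) : List Nat :=
  (List.range (s.length + 1 - sub.length)).filter (fun j => decide (sub <+: s.drop j))

def pvRepl (s sub sep : List Char) (j : Nat) : String :=
  String.ofList (s.take j ++ sep ++ s.drop (j + sub.length))

lemma pvMatches_mem {s sub : List Char} {j : Nat} :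
    j ∈ pvMatches s sub ↔ j + sub.length ≤ s.length ∧ sub <+: s.drop j := by
  unfold pvMatches
  simp only [List.mem_filter, List.mem_range, decide_eq_true_eq]
  constructor
  · rintro ⟨hj, hp⟩
    have := hp.length_le
    simp only [List.length_drop] at this
    exact ⟨by omega, hp⟩
  · rintro ⟨hj, hp⟩
    have := hp.length_le
    simp only [List.length_drop] at this
    exact ⟨by omega, hp⟩

-- str.find(sub, start) with start past the end is -1 (CPython rule).
lemma findFrom_past (s sub : List Char) (k : Int) (hk : (s.length : Int) < k) :
    PySem.Chars.findFrom s sub k none = -1 := by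
  simp only [PySem.Chars.findFrom]
  split_ifs <;> omega

-- first-match decomposition of the ascending match list
lemma pvMatches_filter_cons (s sub : List Char) (k r : Nat) (hk : k ≤ r)
    (hQ : sub <+: s.drop r) (hrlen : r ≤ s.length)
    (hmin : ∀ i, k ≤ i → i < r → ¬ sub <+: s.drop i) :
    (pvMatches s sub).filter (fun j => decide (k ≤ j)) =
      r :: (pvMatches s sub).filter (fun j => decide (r + 1 ≤ j)) := by
  have hlen := hQ.length_le
  simp only [List.length_drop] at hlen
  have hrN : r < s.length + 1 - sub.length := by omega
  unfold pvMatches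
  rw [List.filter_filter, List.filter_filter]
  have hsplit : List.range (s.length + 1 - sub.length) =
      List.range' 0 r ++ r :: List.range' (r + 1) (s.length + 1 - sub.length - r - 1) := by
    rw [List.range_eq_range',
      show s.length + 1 - sub.length = r + (s.length + 1 - sub.length - r - 1 + 1) by omega,
      ← List.range'_append, List.range'_succ]
    simp
  rw [hsplit]
  simp only [List.filter_append, List.filter_cons]
  have h0 : (List.range' 0 r).filter (fun j => decide (k ≤ j) && decide (sub <+: s.drop j)) = [] := by
    rw [List.filter_eq_nil_iff]
    intro a ha
    simp only [List.mem_range'] at ha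
    by_cases hka : k ≤ a
    · simp [hmin a hka (by omega)]
    · simp [hka]
  have h0' : (List.range' 0 r).filter (fun j => decide (r + 1 ≤ j) && decide (sub <+: s.drop j)) = [] := by
    rw [List.filter_eq_nil_iff]
    intro a ha
    simp only [List.mem_range'] at ha
    have : ¬ (r + 1 ≤ a) := by omega
    simp [this]
  rw [h0, h0']
  simp only [hQ, hk, decide_true, Bool.and_self, if_true, List.nil_append]
  have hnr : ¬ (r + 1 ≤ r) := by omega
  simp only [hnr, decide_false]
  congr 1
  apply List.filter_congr
  intro a ha
  simp only [List.mem_range'] at ha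
  have h1 : (k ≤ a) := by omega
  have h2 : (r + 1 ≤ a) := by omega
  simp [h1, h2]

-- no match at or after k ⇒ the tail of the match list is empty
lemma pvMatches_filter_nil (s sub : List Char) (k : Nat)
    (hmin : ∀ j, k ≤ j → ¬ sub <+: s.drop j) :
    (pvMatches s sub).filter (fun j => decide (k ≤ j)) = [] := by
  rw [List.filter_eq_nil_iff]
  intro j hj
  rcases pvMatches_mem.mp hj with ⟨_, hp⟩
  by_cases hkj : k ≤ j
  · exact absurd hp (hmin j hkj)
  · simp [hkj]

lemma pvMatches_filter_nil_of_past (s sub : List Char) (k : Nat) (hk : s.length < k) :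
    (pvMatches s sub).filter (fun j => decide (k ≤ j)) = [] := by
  rw [List.filter_eq_nil_iff]
  intro j hj
  rcases pvMatches_mem.mp hj with ⟨hlen, _⟩
  have : ¬ (k ≤ j) := by omega
  simp [this]

-- the invariant of A's find loop
lemma findLoopA_eq (s sub sep : List Char) :
    ∀ (fuel : Nat) (k : Nat), s.length + 2 - k ≤ fuel →
      findLoopA s sub sep fuel (k : Int) =
        ((pvMatches s sub).filter (fun j => decide (k ≤ j))).map (pvRepl s sub sep) := by
  intro fuel
  induction fuel with
  | zero =>
    intro k hkfuel
    rw [pvMatches_filter_nil_of_past s sub k (by omega), List.map_nil]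
    rfl
  | succ fuel ih =>
    intro k hkfuel
    by_cases hk : k ≤ s.length
    · rw [findLoopA]
      by_cases hidx : PySem.Chars.findFrom s sub (k : Int) none = -1
      · rw [if_pos hidx]
        have hno : ¬ sub <:+: s.drop k :=
          (PySem.Chars.findFrom_natCast_eq_neg_one_iff s sub k hk).mp hidx
        have hnone : ∀ j, k ≤ j → ¬ sub <+: s.drop j := by
          intro j hj hp
          apply hno
          have : s.drop j = (s.drop k).drop (j - k) := by
            rw [List.drop_drop]; congr 1; omega
          rw [this] at hp
          exact hp.isInfix.trans (List.drop_suffix _ _).isInfix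
        rw [pvMatches_filter_nil s sub k hnone, List.map_nil]
      · rw [if_neg hidx]
        obtain ⟨hge, hpre, hmin⟩ := PySem.Chars.findFrom_natCast_spec s sub k hk hidx
        set r := PySem.Chars.findFrom s sub (k : Int) none with hr
        have hrle : r ≤ (s.length : Int) := by
          rw [hr, PySem.Chars.findFrom_natCast s sub k hk]
          have h1 := PySem.Chars.find_le_length (s.drop k) sub
          simp only [List.length_drop] at h1
          split <;> omega
        have hr0 : (0 : Int) ≤ r := le_trans (by exact_mod_cast Nat.zero_le k) hge
        have hrn : r = ((r.toNat : Nat) : Int) := by omega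
        have hrlen : r.toNat ≤ s.length := by omega
        have hkr : k ≤ r.toNat := by omega
        rw [pvMatches_filter_cons s sub k r.toNat hkr hpre hrlen
          (fun i h1 h2 => hmin i h1 h2)]
        rw [List.map_cons]
        congr 1
        · unfold pvRepl
          rw [PySem.List.slice_to s (show (0:Int) ≤ r by omega)]
          rw [PySem.List.slice_from s (show (0:Int) ≤ r + (sub.length : Int) by omega)]
          have : (r + (sub.length : Int)).toNat = r.toNat + sub.length := by omega
          rw [this]
        · have harg : r + 1 = ((r.toNat + 1 : Nat) : Int) := by omega
          rw [harg, ih (r.toNat + 1) (by omega)]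
    · rw [findLoopA]
      rw [if_pos (findFrom_past s sub (k : Int) (by exact_mod_cast by omega : (s.length : Int) < (k : Int)))]
      rw [pvMatches_filter_nil_of_past s sub k (by omega), List.map_nil]

lemma portA_eq (string substring separator : String) :
    find_each_and_replace_by string substring separator =
      (pvMatches string.toList substring.toList).map
        (pvRepl string.toList substring.toList separator.toList) := by
  unfold find_each_and_replace_by
  have h := findLoopA_eq string.toList substring.toList separator.toList
    (string.toList.length + 2) 0 (by omega)
  simp only [Nat.cast_zero] at h
  rw [h]
  congr 1
  apply List.filter_eq_self.mpr
  intro a _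
  simp

lemma portB_eq (string substring separator : String) :
    find_each_and_replace_by_alt string substring separator =
      (pvMatches string.toList substring.toList).map
        (pvRepl string.toList substring.toList separator.toList) := by
  unfold find_each_and_replace_by_alt
  simp only []
  set s := string.toList
  set sub := substring.toList
  set sep := separator.toList
  by_cases hnm : sub.length ≤ s.length
  · rw [PySem.List.pyRange_neg_one_eq_reverse,
      show ((-1 : Int) + 1) = (0 : Int) by norm_num,
      show (s.length : Int) - (sub.length : Int) + 1 = ((s.length + 1 - sub.length : Nat) : Int) by omega,
      PySem.List.pyRange_zero_nat]
    have hfold := PySem.List.foldl_append_if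
      (fun i => decide (PySem.List.slice s (some i) (some (i + (sub.length : Int))) = sub))
      (fun i => String.ofList (PySem.List.slice s none (some i) ++ sep ++
          PySem.List.slice s (some (i + (sub.length : Int))) none))
      (((List.range (s.length + 1 - sub.length)).map (fun (k : Nat) => (k : Int))).reverse) ([] : List String)
    simp only [decide_eq_true_eq] at hfold
    rw [hfold]
    rw [List.nil_append, List.filter_reverse, List.map_reverse, List.reverse_reverse,
      List.filter_map, List.map_map]
    have hfc : ((List.range (s.length + 1 - sub.length)).filter
          ((fun i => decide (PySem.List.slice s (some i) (some (i + (sub.length : Int))) = sub)) ∘ (fun (k : Nat) => (k : Int)))) =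
        (List.range (s.length + 1 - sub.length)).filter (fun j => decide (sub <+: s.drop j)) := by
      apply List.filter_congr
      intro j _
      simp only [Function.comp_apply, decide_eq_decide]
      rw [PySem.List.slice_natCast_add s j sub.length]
      rw [List.prefix_iff_eq_take]
      constructor
      · intro h; exact h.symm
      · intro h; exact h.symm
    rw [hfc]
    unfold pvMatches
    apply List.map_congr_left
    intro j hj
    simp only [Function.comp_apply]
    unfold pvRepl
    rw [PySem.List.slice_to_natCast]
    have : (j : Int) + (sub.length : Int) = ((j + sub.length : Nat) : Int) := by push_cast; ring
    rw [this, PySem.List.slice_from_natCast]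
  · have hempty : PySem.List.pyRange ((s.length : Int) - (sub.length : Int)) (-1) (-1) = [] := by
      apply PySem.List.pyRange_neg_one_eq_nil
      omega
    rw [hempty]
    have hM : pvMatches s sub = [] := by
      unfold pvMatches
      rw [show s.length + 1 - sub.length = 0 by omega]
      simp
    rw [hM]
    simp [List.foldl]

-- ===== VERDICT (by name: the statement is the Claim_ definition above) =====
theorem find_each_and_replace_by_spec : Claim_equal_find_each_and_replace_by := by
  intro string substring separator _
  unfold Spec_find_each_and_replace_by
  rw [portA_eq, portB_eq]
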